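-- pv_equiv track=rewrite | github.com/martinkubicka/Calculator | src/parser.py | peek
-- ===== SOURCE A (Python) =====
-- def peek(string,index,direction):
--     if(direction < 0):
--         string = string[:index]
--         string = string[::-1]
--     else:
--         string = string[index+1:]
--
--     output = ""
--     for i,char in enumerate(string):
--         if char.isdigit() or char == "." or (char == "-" and i == 0 or( direction == -1 and i == index - 1)): #minus operator edge case check
--            output = output + char
--         else:
--             break
--
--     length = len(output)
--
--     if(direction < 0):
--         return output[::-1],length
--     return output, length
-- ===== SOURCE B (Python) =====
-- def peek(string, index, direction):
--     n = len(string)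
--     if direction < 0:
--         # scan backward from index-1 down to 0 over the original string
--         e = index if index >= 0 else n + index
--         e = min(max(e, 0), n)
--         chars = []
--         i = 0
--         p = e - 1
--         while p >= 0:
--             c = string[p]
--             if c.isdigit() or c == "." or (c == "-" and (i == 0 or (direction == -1 and i == index - 1))):
--                 chars.append(c)
--                 i += 1
--                 p -= 1
--             else:
--                 break
--         output = "".join(reversed(chars))
--         return output, len(output)
--     else:
--         st = index + 1 if index + 1 >= 0 else n + index + 1
--         st = min(max(st, 0), n)
--         out = ""
--         p = st
--         while p < n:
--             c = string[p]
--             if c.isdigit() or c == "." or (c == "-" and p == st):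
--                 out = out + c
--                 p += 1
--             else:
--                 break
--         return out, len(out)
-- ===== Notes on version B (the rewrite author's own statement) =====
-- stated objective: alternative
-- what changed: B replaces A's slice-copy + reverse + enumerate machinery with direct index scanning over the original string (backward loop with a position pointer for direction<0, forward loop otherwise), and fixes A's and/or-precedence slip in the minus edge case.
-- intended difference: When direction == -1, 1 <= index <= len(string), every character at positions 1..index-1 is a digit or '.' (or a '-' at position index-1) and string[0] is none of digit/'.'/'-', A's precedence slip (char=='-' and i==0 or (direction==-1 and i==index-1)) accepts string[0] whatever it is and returns (string[:index], index), while B stops there and returns (string[1:index], index-1), the intended 'leading minus only' behaviour the comment in A describes. — e.g. on peek("a1", 2, -1): A returns ("a1", 2), B returns ("1", 1)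
import Mathlib
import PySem

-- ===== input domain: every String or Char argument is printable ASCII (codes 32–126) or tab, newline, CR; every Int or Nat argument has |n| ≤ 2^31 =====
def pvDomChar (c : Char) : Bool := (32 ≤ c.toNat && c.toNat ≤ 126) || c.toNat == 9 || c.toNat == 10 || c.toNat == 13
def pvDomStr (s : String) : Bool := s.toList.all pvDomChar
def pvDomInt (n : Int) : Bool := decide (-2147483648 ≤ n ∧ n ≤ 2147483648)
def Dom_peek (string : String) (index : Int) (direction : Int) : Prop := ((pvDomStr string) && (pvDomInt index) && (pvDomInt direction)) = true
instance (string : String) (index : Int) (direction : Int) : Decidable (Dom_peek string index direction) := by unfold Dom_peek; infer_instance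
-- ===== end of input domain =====

-- B scans the original string in place by index (no slice/reverse copies) and fixes A's
-- and/or-precedence slip in the minus edge case (see D_peek below).

-- ===== PORT A =====
-- A's for-loop over enumerate(string): break = return the accumulated output.
def peekLoopA (direction index : Int) : List (Int × Char) → List Char → List Char
  | [], out => out
  | (i, c) :: rest, out =>
    if PySem.Chars.isdigit c || c == '.' || ((c == '-' && i == 0) || (direction == -1 && i == index - 1)) then
      peekLoopA direction index rest (out ++ [c])
    else out

def peek (string : String) (index : Int) (direction : Int) : String × Int :=
  -- string[:index]; string[::-1] (xs[::-1] is List.reverse: PySem.List.slice?_none_none_neg_one); string[index+1:]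
  let s : List Char :=
    if direction < 0 then (PySem.List.slice string.toList none (some index)).reverse
    else PySem.List.slice string.toList (some (index + 1)) none
  let output := peekLoopA direction index (PySem.List.enumerate s 0) []
  let length : Int := output.length
  if direction < 0 then (String.ofList output.reverse, length) else (String.ofList output, length)

-- ===== PORT B =====
-- B's backward while-loop: fuel = p + 1 (loop runs while p ≥ 0), i the step counter.
def peekScanBack (s : List Char) (direction index : Int) : Nat → Int → List Char
  | 0, _ => []
  | p + 1, i =>
    let c := s.getD p ' '
    if PySem.Chars.isdigit c || c == '.' || (c == '-' && (i == 0 || (direction == -1 && i == index - 1))) then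
      c :: peekScanBack s direction index p (i + 1)
    else []

-- B's forward while-loop over positions p = st, st+1, … of the original string.
def peekScanFwd (s : List Char) (st : Nat) (p : Nat) : List Char :=
  if h : p < s.length then
    let c := s[p]
    if PySem.Chars.isdigit c || c == '.' || (c == '-' && p == st) then
      c :: peekScanFwd s st (p + 1)
    else []
  else []
termination_by s.length - p

def peek_alt (string : String) (index : Int) (direction : Int) : String × Int :=
  let s := string.toList
  let n : Int := s.length
  if direction < 0 then
    let e0 : Int := if 0 ≤ index then index else n + index
    let e : Int := min (max e0 0) n
    let chars := peekScanBack s direction index e.toNat 0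
    let output := chars.reverse
    (String.ofList output, (output.length : Int))
  else
    let st0 : Int := if 0 ≤ index + 1 then index + 1 else n + index + 1
    let st : Nat := (min (max st0 0) n).toNat
    let out := peekScanFwd s st st
    (String.ofList out, (out.length : Int))

-- ===== PRECONDITION & SPEC =====
-- On these inputs A's precedence slip '(char == "-" and i == 0 or (direction == -1 and i == index - 1))'
-- accepts string[0] whatever it is, so A returns (string[:index], index); B stops there and returns
-- (string[1:index], index-1), the intended 'leading minus only' behaviour of A's own comment.
-- a number-body character: digit or '.'
def pvDot (c : Char) : Bool := c == '.'
def pvDash (c : Char) : Bool := c == '-'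
def pvIsNum (c : Char) : Bool := pvDot c || c.isDigit
-- a character a minus-aware number scan accepts: digit, '.' or '-'
def pvMinNum (c : Char) : Bool := pvDash c || pvIsNum c
-- first character of the string, and the rest of the scanned prefix string[1:index]
def pvHd (string : String) : Char := string.toList.getD 0 ' '
def pvTl (string : String) (index : Int) : List Char := (string.toList.take index.toNat).tail

def D_peek (string : String) (index : Int) (direction : Int) : Prop :=
  direction = -1 ∧ 1 ≤ index ∧ index ≤ (string.toList.length : Int) ∧
  pvMinNum (pvHd string) = false ∧
  (pvTl string index).dropLast.all pvIsNum = true ∧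
  (pvTl string index).getLast?.all pvMinNum = true
instance (string : String) (index : Int) (direction : Int) : Decidable (D_peek string index direction) := by
  unfold D_peek; infer_instance

def Spec_peek (string : String) (index : Int) (direction : Int) (out : String × Int) : Prop :=
  ¬ D_peek string index direction → out = peek_alt string index direction
instance (string : String) (index : Int) (direction : Int) (out : String × Int) : Decidable (Spec_peek string index direction out) := by unfold Spec_peek; infer_instance

def pvDiffWitness_peek : String × Int × Int := ("a1", 2, -1)
def pvDiffWitnessOut_peek : (String × Int) × (String × Int) := (("a1", 2), ("1", 1))

-- ===== CLAIM (what is proved, stated in full; the proofs are below) =====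
def Claim_unchanged_peek : Prop := ∀ (string : String) (index : Int) (direction : Int), Dom_peek string index direction → Spec_peek string index direction (peek string index direction)
def Claim_changed_peek : Prop := Dom_peek (pvDiffWitness_peek.1) (pvDiffWitness_peek.2.1) (pvDiffWitness_peek.2.2) ∧ D_peek (pvDiffWitness_peek.1) (pvDiffWitness_peek.2.1) (pvDiffWitness_peek.2.2) ∧ peek (pvDiffWitness_peek.1) (pvDiffWitness_peek.2.1) (pvDiffWitness_peek.2.2) = pvDiffWitnessOut_peek.1 ∧ peek_alt (pvDiffWitness_peek.1) (pvDiffWitness_peek.2.1) (pvDiffWitness_peek.2.2) = pvDiffWitnessOut_peek.2 ∧ pvDiffWitnessOut_peek.1 ≠ pvDiffWitnessOut_peek.2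
def Claim_exact_peek : Prop := ∀ (string : String) (index : Int) (direction : Int), Dom_peek string index direction → D_peek string index direction → peek string index direction ≠ peek_alt string index direction

-- ===== LEMMAS AND PROOFS =====

-- the two acceptance conditions, named for the proofs (the ports inline them)
def condA (direction index i : Int) (c : Char) : Bool :=
  PySem.Chars.isdigit c || c == '.' || ((c == '-' && i == 0) || (direction == -1 && i == index - 1))
def condB (direction index i : Int) (c : Char) : Bool :=
  PySem.Chars.isdigit c || c == '.' || (c == '-' && (i == 0 || (direction == -1 && i == index - 1)))

lemma peekLoopA_cons (direction index i : Int) (c : Char) (rest : List (Int × Char)) (out : List Char) :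
    peekLoopA direction index ((i, c) :: rest) out =
      if condA direction index i c then peekLoopA direction index rest (out ++ [c]) else out := rfl

lemma peekScanBack_succ (s : List Char) (direction index : Int) (p : Nat) (i : Int) :
    peekScanBack s direction index (p + 1) i =
      if condB direction index i (s.getD p ' ') then
        s.getD p ' ' :: peekScanBack s direction index p (i + 1)
      else [] := rfl

lemma peekScanFwd_unfold (s : List Char) (st p : Nat) :
    peekScanFwd s st p =
      if h : p < s.length then
        (if PySem.Chars.isdigit s[p] || s[p] == '.' || (s[p] == '-' && p == st) then
          s[p] :: peekScanFwd s st (p + 1)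
        else [])
      else [] := by
  rw [peekScanFwd]

-- Python's slice-bound clamping, as B computes it, equals PySem's clampIdx
lemma clamp_eq (n : Nat) (a : Int) :
    (min (max (if 0 ≤ a then a else (n : Int) + a) 0) (n : Int)).toNat = PySem.List.clampIdx n a := by
  unfold PySem.List.clampIdx
  split_ifs <;> omega

lemma slice_none_some (s : List Char) (b : Int) :
    PySem.List.slice s none (some b) = s.take (PySem.List.clampIdx s.length b) := by
  simp [PySem.List.slice]

lemma clampIdx_le_len (n : Nat) (a : Int) : PySem.List.clampIdx n a ≤ n := by
  unfold PySem.List.clampIdx; split_ifs <;> omega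

-- the reversed prefix, cell by cell
lemma rev_take_getD (s : List Char) (e : Nat) (he : e ≤ s.length) (j : Nat) (hj : j < e) :
    ((s.take e).reverse).getD j ' ' = s.getD (e - 1 - j) ' ' := by
  have hj2 : j < (s.take e).reverse.length := by simp; omega
  have h2 : e - 1 - j < s.length := by omega
  rw [List.getD_eq_getElem _ _ hj2, List.getD_eq_getElem _ _ h2, List.getElem_reverse]
  simp only [List.getElem_take]
  congr 1
  simp
  omega

-- forward case: A's scan of string[index+1:] equals B's pointer scan from st
lemma fwd_eq (direction index : Int) (hd : ¬ direction < 0) (s : List Char) (st : Nat) :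
    ∀ k p, s.length - p ≤ k → st ≤ p → ∀ acc,
      peekLoopA direction index (PySem.List.enumerate (s.drop p) ((p : Int) - st)) acc
        = acc ++ peekScanFwd s st p := by
  intro k
  induction k with
  | zero =>
    intro p hk hst acc
    have hlen : s.length ≤ p := by omega
    rw [List.drop_eq_nil_of_le hlen, peekScanFwd_unfold]
    simp [PySem.List.enumerate, peekLoopA, Nat.not_lt.2 hlen]
  | succ k ih =>
    intro p hk hst acc
    by_cases h : p < s.length
    · have hdrop : s.drop p = s[p] :: s.drop (p + 1) := List.drop_eq_getElem_cons h
      rw [hdrop, PySem.List.enumerate_cons, peekLoopA_cons, peekScanFwd_unfold, dif_pos h]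
      have hdir : (direction == -1) = false := by
        simp only [beq_eq_false_iff_ne]; omega
      have hieq : ((p : Int) - st == 0) = (p == st) := by
        rcases eq_or_ne p st with hp | hp
        · simp [hp]
        · have h1 : (p == st) = false := beq_eq_false_iff_ne.mpr hp
          have h2 : (((p : Int) - (st : Int)) == (0 : Int)) = false := beq_eq_false_iff_ne.mpr (by omega)
          rw [h1, h2]
      have hcond : condA direction index ((p : Int) - st) s[p]
          = (PySem.Chars.isdigit s[p] || s[p] == '.' || (s[p] == '-' && p == st)) := by
        simp [condA, hdir, hieq]
      rw [hcond]
      by_cases hc : (PySem.Chars.isdigit s[p] || s[p] == '.' || (s[p] == '-' && p == st)) = true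
      · rw [if_pos hc, if_pos hc]
        have harg : (p : Int) - st + 1 = ((p + 1 : Nat) : Int) - st := by push_cast; ring
        rw [harg, ih (p + 1) (by omega) (by omega) (acc ++ [s[p]])]
        simp
      · rw [if_neg hc, if_neg hc, List.append_nil]
    · have hlen : s.length ≤ p := by omega
      rw [List.drop_eq_nil_of_le hlen, peekScanFwd_unfold]
      simp [PySem.List.enumerate, peekLoopA, Nat.not_lt.2 hlen]

-- character-class bridges
lemma isdigit_eq (c : Char) : PySem.Chars.isdigit c = c.isDigit := rfl

lemma pvIsNum_iff (c : Char) : pvIsNum c = true ↔ (PySem.Chars.isdigit c = true ∨ c = '.') := by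
  simp [pvIsNum, pvDot, isdigit_eq, or_comm]

lemma pvMinNum_iff (c : Char) : pvMinNum c = true ↔
    (PySem.Chars.isdigit c = true ∨ c = '.' ∨ c = '-') := by
  simp only [pvMinNum, pvDash, pvIsNum, pvDot, isdigit_eq, Bool.or_eq_true, beq_iff_eq]
  tauto

lemma pvMinNum_false_iff (c : Char) : pvMinNum c = false ↔
    (PySem.Chars.isdigit c = false ∧ c ≠ '.' ∧ c ≠ '-') := by
  rw [← Bool.not_eq_true, pvMinNum_iff]
  simp [not_or]

-- the number-body condition on string[1:index], pointwise
lemma tail_iff (u : List Char) :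
    (u.dropLast.all pvIsNum = true ∧ u.getLast?.all pvMinNum = true) ↔
      (∀ j : Nat, j < u.length →
        (PySem.Chars.isdigit (u.getD j ' ') = true ∨ u.getD j ' ' = '.' ∨
          (j = u.length - 1 ∧ u.getD j ' ' = '-'))) := by
  rcases List.eq_nil_or_concat u with rfl | ⟨v, a, rfl⟩
  · simp
  · rw [List.concat_eq_append, List.dropLast_concat, List.getLast?_concat]
    simp only [List.length_append, List.length_cons, List.length_nil, List.all_eq_true,
      Option.all_some]
    constructor
    · rintro ⟨h1, h2⟩ j hj
      by_cases hjv : j < v.length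
      · have hg : (v ++ [a]).getD j ' ' = v[j] := by
          rw [List.getD_eq_getElem _ _ (by simp; omega), List.getElem_append_left hjv]
        rw [hg]
        rcases (pvIsNum_iff _).mp (h1 v[j] (List.getElem_mem hjv)) with h | h
        · exact Or.inl h
        · exact Or.inr (Or.inl h)
      · have hje : j = v.length := by omega
        subst hje
        have hg : (v ++ [a]).getD v.length ' ' = a := by
          rw [List.getD_eq_getElem _ _ (by simp)]
          simp
        rw [hg]
        rcases (pvMinNum_iff a).mp h2 with h | h | h
        · exact Or.inl h
        · exact Or.inr (Or.inl h)
        · exact Or.inr (Or.inr ⟨by omega, h⟩)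
    · intro h
      constructor
      · intro x hx
        obtain ⟨j, hjv, rfl⟩ := List.mem_iff_getElem.mp hx
        have hh := h j (by omega)
        have hg : (v ++ [a]).getD j ' ' = v[j] := by
          rw [List.getD_eq_getElem _ _ (by simp; omega), List.getElem_append_left hjv]
        rw [hg] at hh
        rcases hh with h' | h' | h'
        · exact (pvIsNum_iff _).mpr (Or.inl h')
        · exact (pvIsNum_iff _).mpr (Or.inr h')
        · exfalso
          have := h'.1
          omega
      · have hh := h v.length (by omega)
        have hg : (v ++ [a]).getD v.length ' ' = a := by
          rw [List.getD_eq_getElem _ _ (by simp)]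
          simp
        rw [hg] at hh
        rcases hh with h' | h' | h'
        · exact (pvMinNum_iff a).mpr (Or.inl h')
        · exact (pvMinNum_iff a).mpr (Or.inr (Or.inl h'))
        · exact (pvMinNum_iff a).mpr (Or.inr (Or.inr h'.2))

-- D_peek, pointwise (the form the scan proofs use)
lemma D_iff (string : String) (index direction : Int) :
    D_peek string index direction ↔
      (direction = -1 ∧ 1 ≤ index ∧ index ≤ (string.toList.length : Int) ∧
        (PySem.Chars.isdigit (string.toList.getD 0 ' ') = false ∧
          string.toList.getD 0 ' ' ≠ '.' ∧ string.toList.getD 0 ' ' ≠ '-') ∧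
        ∀ p : Nat, p < string.toList.length → 1 ≤ p → (p : Int) < index →
          (PySem.Chars.isdigit (string.toList.getD p ' ') = true ∨ string.toList.getD p ' ' = '.' ∨
            ((p : Int) = index - 1 ∧ string.toList.getD p ' ' = '-'))) := by
  unfold D_peek
  refine and_congr_right fun hd => and_congr_right fun h2 => and_congr_right fun h3 => ?_
  rcases hsl : string.toList with _ | ⟨c, rest⟩
  · rw [hsl] at h3
    simp at h3
    omega
  have hrl : index ≤ (rest.length : Int) + 1 := by
    rw [hsl] at h3
    simpa using h3
  have hk1 : 1 ≤ index.toNat := by omega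
  have hkr : index.toNat - 1 ≤ rest.length := by omega
  obtain ⟨m, hm⟩ : ∃ m, index.toNat = m + 1 := ⟨index.toNat - 1, by omega⟩
  have hpvHd : pvHd string = c := by
    unfold pvHd
    rw [hsl]
    simp
  have hpvTl : pvTl string index = rest.take (index.toNat - 1) := by
    unfold pvTl
    rw [hsl, hm]
    simp
  rw [hpvHd, hpvTl, pvMinNum_false_iff, tail_iff]
  simp only [List.getD_cons_zero]
  have hulen : (rest.take (index.toNat - 1)).length = index.toNat - 1 := by
    rw [List.length_take]
    omega
  have hu : ∀ j : Nat, j < index.toNat - 1 →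
      (rest.take (index.toNat - 1)).getD j ' ' = rest.getD j ' ' := by
    intro j hj
    rw [List.getD_eq_getElem _ _ (by omega : j < (rest.take (index.toNat - 1)).length),
      List.getD_eq_getElem _ _ (by omega : j < rest.length), List.getElem_take]
  constructor
  · rintro ⟨h1, hmid⟩
    refine ⟨h1, ?_⟩
    intro p hp hp1 hpi
    obtain ⟨j, rfl⟩ : ∃ j, p = j + 1 := ⟨p - 1, by omega⟩
    have hji : j < index.toNat - 1 := by omega
    have hmj := hmid j (by omega)
    rw [hu j hji] at hmj
    simp only [List.getD_cons_succ]
    rcases hmj with h | h | h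
    · exact Or.inl h
    · exact Or.inr (Or.inl h)
    · refine Or.inr (Or.inr ⟨?_, h.2⟩)
      have := h.1
      rw [hulen] at this
      omega
  · rintro ⟨h1, hmid⟩
    refine ⟨h1, ?_⟩
    intro j hj
    rw [hulen] at hj
    have hmj := hmid (j + 1) (by simp only [List.length_cons]; omega) (by omega) (by omega)
    simp only [List.getD_cons_succ] at hmj
    rw [hu j hj]
    rcases hmj with h | h | h
    · exact Or.inl h
    · exact Or.inr (Or.inl h)
    · refine Or.inr (Or.inr ⟨?_, h.2⟩)
      have := h.1
      rw [hulen]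
      omega

-- backward case: outside D_, A's scan of string[:index][::-1] equals B's backward pointer scan
lemma bwd_eq (string : String) (index direction : Int) (hdir : direction < 0)
    (hnd : ¬ D_peek string index direction) :
    ∀ k i, i ≤ PySem.List.clampIdx string.toList.length index →
      PySem.List.clampIdx string.toList.length index - i ≤ k →
      (∀ j, j < i → condA direction index (j : Int)
        (((string.toList.take (PySem.List.clampIdx string.toList.length index)).reverse).getD j ' ') = true) →
      ∀ acc,
      peekLoopA direction index
          (PySem.List.enumerate
            (((string.toList.take (PySem.List.clampIdx string.toList.length index)).reverse).drop i) (i : Int)) acc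
        = acc ++ peekScanBack string.toList direction index
            (PySem.List.clampIdx string.toList.length index - i) (i : Int) := by
  set s := string.toList with hs
  set e := PySem.List.clampIdx s.length index with he
  have hen : e ≤ s.length := clampIdx_le_len s.length index
  set l := (s.take e).reverse with hl
  have hllen : l.length = e := by rw [hl]; simp; omega
  have hcell : ∀ j, j < e → l.getD j ' ' = s.getD (e - 1 - j) ' ' := by
    intro j hj; rw [hl]; exact rev_take_getD s e hen j hj
  intro k
  induction k with
  | zero =>
    intro i hie hk hgood acc
    have hdropnil : l.drop i = [] := List.drop_eq_nil_of_le (by omega)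
    have h0 : e - i = 0 := by omega
    rw [hdropnil, h0]
    simp [PySem.List.enumerate, peekLoopA, peekScanBack]
  | succ k ih =>
    intro i hie hk hgood acc
    by_cases hiend : i = e
    · have hdropnil : l.drop i = [] := List.drop_eq_nil_of_le (by omega)
      have h0 : e - i = 0 := by omega
      rw [hdropnil, h0]
      simp [PySem.List.enumerate, peekLoopA, peekScanBack]
    · have hilt : i < e := by omega
      have hil : i < l.length := by omega
      have hdrop : l.drop i = l[i] :: l.drop (i + 1) := List.drop_eq_getElem_cons hil
      have hgd : l[i] = l.getD i ' ' := (List.getD_eq_getElem _ _ hil).symm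
      set c := l.getD i ' ' with hc
      have hfuel : e - i = (e - i - 1) + 1 := by omega
      have hpos : e - i - 1 = e - 1 - i := by omega
      have hcs : s.getD (e - 1 - i) ' ' = c := by rw [hc, hcell i hilt]
      rw [hdrop, hgd, PySem.List.enumerate_cons, peekLoopA_cons, hfuel, peekScanBack_succ, hpos, hcs]
      -- compare the two conditions at step i
      have hcond : condA direction index (i : Int) c = condB direction index (i : Int) c := by
        by_cases hq : (direction = -1 ∧ (i : Int) = index - 1)
        · by_cases hch : (PySem.Chars.isdigit c || c == '.' || c == '-') = true
          · obtain ⟨hq1, hq2⟩ := hq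
            subst hq1
            simp only [condA, condB]
            rcases Bool.or_eq_true .. ▸ hch with h | h
            · rcases Bool.or_eq_true .. ▸ h with h' | h'
              · simp [h']
              · simp [h']
            · simp [h, hq2]
          · -- the two programs would differ here: this is exactly D_peek, contradiction
            exfalso
            apply hnd
            obtain ⟨hq1, hq2⟩ := hq
            have hienat : i = e - 1 ∧ (e : Int) = index := by
              constructor
              · rw [he] at hilt ⊢
                unfold PySem.List.clampIdx at hilt ⊢
                split_ifs at hilt ⊢ <;> omega
              · rw [he]
                unfold PySem.List.clampIdx
                split_ifs <;> omega
            obtain ⟨hie1, hie2⟩ := hienat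
            have hs0 : s.getD 0 ' ' = c := by
              have h00 : e - 1 - i = 0 := by omega
              rw [← hcs, h00]
            simp only [Bool.or_eq_true, beq_iff_eq, not_or, Bool.not_eq_true] at hch
            rw [D_iff]
            rw [← hs]
            refine ⟨hq1, by omega, by omega, ?_, ?_⟩
            · rw [hs0]
              exact ⟨hch.1.1, hch.1.2, hch.2⟩
            · intro p hp hp1 hpidx
              have hj : e - 1 - p < i := by omega
              have hgj := hgood (e - 1 - p) hj
              rw [hcell (e - 1 - p) (by omega)] at hgj
              have hback : e - 1 - (e - 1 - p) = p := by omega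
              rw [hback] at hgj
              simp only [condA, Bool.or_eq_true, Bool.and_eq_true, beq_iff_eq] at hgj
              rcases hgj with (h | h) | (h | h)
              · exact Or.inl h
              · exact Or.inr (Or.inl h)
              · refine Or.inr (Or.inr ⟨?_, h.1⟩)
                have h20 : ((e - 1 - p : Nat) : Int) = 0 := h.2
                omega
              · exfalso
                have h21 : ((e - 1 - p : Nat) : Int) = index - 1 := h.2
                omega
        · -- quirk clause is false: both conditions reduce to digit/'.'/leading '-'
          have hqf : (direction == -1 && ((i : Int) == index - 1)) = false := by
            rcases Decidable.not_and_iff_not_or_not.mp hq with h | h <;> simp [h]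
          simp only [condA, condB, hqf, Bool.or_false]
      rw [hcond]
      by_cases hb : condB direction index (i : Int) c = true
      · rw [if_pos hb, if_pos hb]
        have harg : (i : Int) + 1 = ((i + 1 : Nat) : Int) := by push_cast; ring
        have hfuel2 : e - 1 - i = e - (i + 1) := by omega
        rw [harg, hfuel2, ih (i + 1) (by omega) (by omega) ?_ (acc ++ [c])]
        · simp
        · intro j hj
          by_cases hji : j < i
          · exact hgood j hji
          · have hje : j = i := by omega
            rw [hje, ← hc, hcond]
            exact hb
      · rw [if_neg hb, if_neg hb, List.append_nil]

-- when every scanned character is accepted, A's loop consumes the whole list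
lemma loopA_all (direction index : Int) :
    ∀ (L : List Char) (i0 : Int) (acc : List Char),
      (∀ j : Nat, j < L.length → condA direction index (i0 + j) (L.getD j ' ') = true) →
      peekLoopA direction index (PySem.List.enumerate L i0) acc = acc ++ L := by
  intro L
  induction L with
  | nil => intro i0 acc h; simp [PySem.List.enumerate, peekLoopA]
  | cons x xs ih =>
    intro i0 acc h
    rw [PySem.List.enumerate_cons, peekLoopA_cons]
    have h0 := h 0 (by simp)
    simp only [Nat.cast_zero, add_zero, List.getD_cons_zero] at h0
    rw [if_pos h0, ih (i0 + 1) (acc ++ [x]) ?_]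
    · simp
    · intro j hj
      have hj1 := h (j + 1) (by simp; omega)
      simp only [List.getD_cons_succ] at hj1
      have : i0 + ((j + 1 : Nat) : Int) = i0 + 1 + (j : Int) := by push_cast; ring
      rw [this] at hj1
      exact hj1

-- inside D_, B's backward scan accepts positions k-1 … 1 and rejects position 0
lemma scanBack_len_D (string : String) (index : Int)
    (hbad : PySem.Chars.isdigit (string.toList.getD 0 ' ') = false ∧
      string.toList.getD 0 ' ' ≠ '.' ∧ string.toList.getD 0 ' ' ≠ '-')
    (hmid : ∀ p : Nat, p < string.toList.length → 1 ≤ p → (p : Int) < index →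
      (PySem.Chars.isdigit (string.toList.getD p ' ') = true ∨ string.toList.getD p ' ' = '.' ∨
        ((p : Int) = index - 1 ∧ string.toList.getD p ' ' = '-')))
    (hlen : index ≤ (string.toList.length : Int)) :
    ∀ k : Nat, 1 ≤ k → (k : Int) ≤ index → ∀ i : Int, i = index - k →
      (peekScanBack string.toList (-1) index k i).length = k - 1 := by
  intro k
  induction k with
  | zero => intro h; exact absurd h (by omega)
  | succ k ih =>
    intro hk1 hk2 i hi
    rw [peekScanBack_succ]
    by_cases hk0 : k = 0
    · subst hk0
      have h1 : (string.toList.getD 0 ' ' == '.') = false := beq_eq_false_iff_ne.mpr hbad.2.1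
      have h2 : (string.toList.getD 0 ' ' == '-') = false := beq_eq_false_iff_ne.mpr hbad.2.2
      have hcB : condB (-1) index i (string.toList.getD 0 ' ') = false := by
        simp only [condB, hbad.1, h1, h2, Bool.false_or, Bool.false_and]
      rw [hcB]
      simp
    · have hklt : k < string.toList.length := by omega
      have hc := hmid k hklt (by omega) (by omega)
      have hcB : condB (-1) index i (string.toList.getD k ' ') = true := by
        rcases hc with h | h | h
        · simp only [condB, h, Bool.true_or]
        · rw [condB, h]
          simp
        · have hi0 : i = 0 := by have := h.1; omega
          rw [condB, h.2, hi0]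
          simp
      rw [hcB, if_pos rfl, List.length_cons, ih (by omega) (by omega) (i + 1) (by omega)]
      omega

-- ===== VERDICT (by name: the statement is the Claim_ definition above) =====
theorem peek_spec : Claim_unchanged_peek := by
  intro string index direction _ hnd
  show peek string index direction = peek_alt string index direction
  unfold peek peek_alt
  by_cases hdir : direction < 0
  · simp only [if_pos hdir]
    rw [slice_none_some]
    have hb := bwd_eq string index direction hdir hnd
      (PySem.List.clampIdx string.toList.length index) 0 (by omega) (by omega)
      (by intro j hj; exact absurd hj (Nat.not_lt_zero j)) []
    simp only [List.drop_zero, Nat.sub_zero, List.nil_append, Nat.cast_zero] at hb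
    rw [hb, clamp_eq]
    simp
  · simp only [if_neg hdir]
    rw [PySem.List.slice_some_none]
    have hf := fwd_eq direction index hdir string.toList
      (PySem.List.clampIdx string.toList.length (index + 1))
      string.toList.length (PySem.List.clampIdx string.toList.length (index + 1))
      (by omega) (by omega) []
    simp only [sub_self, List.nil_append] at hf
    have hclamp : (min (max (if 0 ≤ index + 1 then index + 1 else (string.toList.length : Int) + index + 1) 0)
        (string.toList.length : Int)).toNat = PySem.List.clampIdx string.toList.length (index + 1) := by
      unfold PySem.List.clampIdx
      split_ifs <;> omega
    rw [hf, hclamp]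
theorem peek_changed : Claim_changed_peek := by
  unfold Claim_changed_peek; decide

theorem peek_tight : Claim_exact_peek := by
  intro string index direction _ hD
  obtain ⟨hd1, hd2, hd3, hbad, hmid⟩ := (D_iff string index direction).mp hD
  subst hd1
  have hneg : (-1 : Int) < 0 := by norm_num
  have hen : index.toNat ≤ string.toList.length := by omega
  have hE : PySem.List.clampIdx string.toList.length index = index.toNat := by
    unfold PySem.List.clampIdx
    split_ifs <;> omega
  have hllen : ((string.toList.take index.toNat).reverse).length = index.toNat := by
    rw [List.length_reverse, List.length_take]
    omega
  have hacc : ∀ j : Nat, j < ((string.toList.take index.toNat).reverse).length →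
      condA (-1) index ((0 : Int) + j) (((string.toList.take index.toNat).reverse).getD j ' ') = true := by
    intro j hj
    rw [hllen] at hj
    rw [rev_take_getD string.toList index.toNat hen j hj]
    by_cases hje : j = index.toNat - 1
    · have hji : ((j : Nat) : Int) = index - 1 := by omega
      simp [condA, hji]
    · have hp1 : 1 ≤ index.toNat - 1 - j := by omega
      have hp2 : index.toNat - 1 - j < string.toList.length := by omega
      have hp3 : ((index.toNat - 1 - j : Nat) : Int) < index := by omega
      rcases hmid (index.toNat - 1 - j) hp2 hp1 hp3 with h | h | h
      · simp only [condA, h, Bool.true_or]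
      · rw [condA, h]
        simp
      · have hj0 : j = 0 := by
          have := h.1
          omega
        subst hj0
        rw [condA, h.2]
        simp
  have hA : (peek string index (-1)).2 = index := by
    simp only [peek, if_pos hneg]
    rw [slice_none_some, hE,
      loopA_all (-1) index ((string.toList.take index.toNat).reverse) 0 [] hacc]
    simp only [List.nil_append, List.length_reverse, List.length_take]
    omega
  have hB : (peek_alt string index (-1)).2 = index - 1 := by
    simp only [peek_alt, if_pos hneg]
    have hclamp : (min (max (if (0 : Int) ≤ index then index
        else (string.toList.length : Int) + index) 0) (string.toList.length : Int)).toNat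
        = index.toNat := by
      split_ifs <;> omega
    rw [hclamp, List.length_reverse,
      scanBack_len_D string index hbad hmid hd3 index.toNat (by omega) (by omega) 0 (by omega)]
    omega
  intro heq
  rw [heq] at hA
  rw [hA] at hB
  omega
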